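-- pv_equiv track=rewrite | github.com/twalenczyk/quantum-algorithms | qutip/simons-alg.py | gen_oracle
-- ===== SOURCE A (Python) =====
-- def gen_oracle(k, D):
--     c = 0
--     f = [ -1 for _ in range(2**k) ]
--     for x in range(2**k):
--         for y in range(2**k):
--             if x^y in D:
--                 if x == y and f[x] == -1:
--                     f[x] = c
--                     c += 1
--                 else:
--                     f[x] = f[y] = f[x] if x < y else f[y]
--     return f
-- ===== SOURCE B (Python) =====
-- def gen_oracle(k, D):
--     n = 2 ** k
--     f = []
--     c = 0
--     for x in range(n):
--         best = -1
--         for d in D: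
--             y = x ^ d
--             if 0 <= y < x and y > best:
--                 best = y
--         v = f[best] if best >= 0 else -1
--         if 0 in D and v == -1:
--             v = c
--             c += 1
--         f.append(v)
--     return f
-- ===== Notes on version B (the rewrite author's own statement) =====
-- stated objective: alternative
-- what changed: A scans all 2^k*2^k pairs (x,y) repeatedly merging colors through the f array; B makes a single pass over x, computing for each x the largest already-colored partner x^d (d in D) directly from D, so the inner scan over all y disappears.
import Mathlib
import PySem

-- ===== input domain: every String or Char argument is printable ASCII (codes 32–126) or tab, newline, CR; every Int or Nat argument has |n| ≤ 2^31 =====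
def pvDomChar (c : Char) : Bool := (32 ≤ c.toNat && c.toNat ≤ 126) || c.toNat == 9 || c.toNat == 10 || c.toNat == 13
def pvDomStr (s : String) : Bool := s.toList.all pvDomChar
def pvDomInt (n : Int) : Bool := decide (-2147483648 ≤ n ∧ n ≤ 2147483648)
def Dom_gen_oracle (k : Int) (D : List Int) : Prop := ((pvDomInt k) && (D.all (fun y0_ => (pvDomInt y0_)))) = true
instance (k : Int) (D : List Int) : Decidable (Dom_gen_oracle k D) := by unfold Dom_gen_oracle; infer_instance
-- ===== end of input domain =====

-- B replaces A's double loop over all pairs (x, y) by a single pass over x that scans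
-- only the |D| partners x^d ('alternative' algorithm; equality of return values proved below).

-- ===== PORT A =====
-- inner loop body: 'for y in range(2**k): if x^y in D: ...' on state (c, f)
def aInner (D : List Int) (x : Int) (st : Int × List Int) (y : Int) : Int × List Int :=
  if PySem.Int.bxor x y ∈ D then
    if x = y ∧ PySem.List.pyGetD st.2 x 0 = -1 then
      (st.1 + 1, PySem.List.pySetD st.2 x st.1)
    else
      -- f[x] = f[y] = (f[x] if x < y else f[y])
      let v := if x < y then PySem.List.pyGetD st.2 x 0 else PySem.List.pyGetD st.2 y 0
      (st.1, PySem.List.pySetD (PySem.List.pySetD st.2 x v) y v)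
  else st

-- outer loop body: one x with its full inner loop over y
def aStep (D : List Int) (n : Int) (st : Int × List Int) (x : Int) : Int × List Int :=
  (PySem.List.pyRange 0 n 1).foldl (aInner D x) st

def gen_oracle (k : Int) (D : List Int) : List Int :=
  let n : Int := 2 ^ k.toNat
  let f : List Int := (PySem.List.pyRange 0 n 1).map (fun _ => (-1 : Int))
  let res := (PySem.List.pyRange 0 n 1).foldl (aStep D n) (0, f)
  res.2

-- ===== PORT B =====
-- best = max of the partners x^d (d in D) that lie in [0, x), else -1
def bBest (D : List Int) (x : Int) : Int :=
  D.foldl (fun best d =>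
    let y := PySem.Int.bxor x d
    if 0 ≤ y ∧ y < x ∧ best < y then y else best) (-1)

-- one x of B's single pass, on state (f, c)
def bStep (D : List Int) (st : List Int × Int) (x : Int) : List Int × Int :=
  let best := bBest D x
  let v := if 0 ≤ best then PySem.List.pyGetD st.1 best 0 else -1
  if (0 : Int) ∈ D ∧ v = -1 then (st.1 ++ [st.2], st.2 + 1) else (st.1 ++ [v], st.2)

def gen_oracle_alt (k : Int) (D : List Int) : List Int :=
  let n : Int := 2 ^ k.toNat
  let res := (PySem.List.pyRange 0 n 1).foldl (bStep D) ([], 0)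
  res.1

-- ===== PRECONDITION & SPEC =====
-- Pre_ excludes k < 0, on which Python's range(2**k) receives a float and raises TypeError.
def Pre_gen_oracle (k : Int) (D : List Int) : Prop := 0 ≤ k
instance (k : Int) (D : List Int) : Decidable (Pre_gen_oracle k D) := by unfold Pre_gen_oracle; infer_instance
def pvWitness_gen_oracle : Int × List Int := (2, [3, 0])

def Spec_gen_oracle (k : Int) (D : List Int) (out : List Int) : Prop := out = gen_oracle_alt k D
instance (k : Int) (D : List Int) (out : List Int) : Decidable (Spec_gen_oracle k D out) := by unfold Spec_gen_oracle; infer_instance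

-- ===== CLAIM (what is proved, stated in full; the proofs are below) =====
def Claim_equal_gen_oracle : Prop := ∀ (k : Int) (D : List Int), Dom_gen_oracle k D → Pre_gen_oracle k D → Spec_gen_oracle k D (gen_oracle k D)

-- ===== LEMMAS AND PROOFS =====

-- ---- generic list/getD helpers ----
lemma getD_append_left (l1 l2 : List Int) (i : Nat) (h : i < l1.length) :
    (l1 ++ l2).getD i 0 = l1.getD i 0 := by
  rw [List.getD_eq_getElem?_getD, List.getD_eq_getElem?_getD, List.getElem?_append_left h]

lemma getD_append_right (l1 l2 : List Int) (i : Nat) (h : l1.length ≤ i) :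
    (l1 ++ l2).getD i 0 = l2.getD (i - l1.length) 0 := by
  rw [List.getD_eq_getElem?_getD, List.getD_eq_getElem?_getD, List.getElem?_append_right h]

lemma getD_set_self (l : List Int) (i : Nat) (v : Int) (h : i < l.length) :
    (l.set i v).getD i 0 = v := by
  rw [List.getD_eq_getElem?_getD, List.getElem?_set_self (by simpa using h)]
  simp

lemma getD_set_ne (l : List Int) (i j : Nat) (v : Int) (h : i ≠ j) :
    (l.set i v).getD j 0 = l.getD j 0 := by
  rw [List.getD_eq_getElem?_getD, List.getD_eq_getElem?_getD, List.getElem?_set_ne h]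

lemma getD_eq_get (l : List Int) (i : Nat) (h : i < l.length) : l.getD i 0 = l[i] := by
  rw [List.getD_eq_getElem?_getD, List.getElem?_eq_getElem h]
  rfl

lemma set_of_getD (l : List Int) (i : Nat) (v : Int) (h : i < l.length) (hv : l.getD i 0 = v) :
    l.set i v = l := by
  have hg : l.getD i 0 = l[i] := getD_eq_get l i h
  rw [← hv, hg]
  exact List.set_getElem_self h

lemma ext_getD (l1 l2 : List Int) (hlen : l1.length = l2.length)
    (h : ∀ i, i < l1.length → l1.getD i 0 = l2.getD i 0) : l1 = l2 := by
  apply List.ext_getElem hlen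
  intro i h1 h2
  have := h i h1
  rwa [getD_eq_get _ _ h1, getD_eq_get _ _ h2] at this

lemma foldl_congr' {A B : Type} (l : List A) (f g : B → A → B) (init : B)
    (h : ∀ acc y, y ∈ l → f acc y = g acc y) : l.foldl f init = l.foldl g init := by
  induction l generalizing init with
  | nil => rfl
  | cons y ys ih =>
    simp only [List.foldl_cons]
    rw [h init y (List.mem_cons_self ..)]
    exact ih _ (fun acc z hz => h acc z (List.mem_cons_of_mem _ hz))

-- ---- xor cancellation ----
lemma bxor_cancel (a b : Int) : PySem.Int.bxor a (PySem.Int.bxor a b) = b := by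
  have hxor : ∀ m n : Nat, m ^^^ (m ^^^ n) = n := fun m n => by
    rw [← Nat.xor_assoc, Nat.xor_self, Nat.zero_xor]
  rcases (by omega : 0 ≤ a ∨ a < 0) with ha | ha <;> rcases (by omega : 0 ≤ b ∨ b < 0) with hb | hb
  · have h1 : PySem.Int.bxor a b = ((a.toNat ^^^ b.toNat : Nat) : Int) := by
      unfold PySem.Int.bxor; rw [if_pos ha, if_pos hb]
    rw [h1]
    unfold PySem.Int.bxor
    rw [if_pos ha, if_pos (Int.natCast_nonneg _), Int.toNat_natCast, hxor,
      Int.toNat_of_nonneg hb]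
  · have h1 : PySem.Int.bxor a b = -((a.toNat ^^^ (-b-1).toNat : Nat) : Int) - 1 := by
      unfold PySem.Int.bxor; rw [if_pos ha, if_neg (show ¬ (0:Int) ≤ b by omega)]
    rw [h1]
    unfold PySem.Int.bxor
    rw [if_pos ha,
      if_neg (show ¬ (0:Int) ≤ -((a.toNat ^^^ (-b-1).toNat : Nat) : Int) - 1 by omega)]
    have h2 : (-(-((a.toNat ^^^ (-b-1).toNat : Nat) : Int) - 1) - 1)
        = ((a.toNat ^^^ (-b-1).toNat : Nat) : Int) := by ring
    rw [h2, Int.toNat_natCast, hxor]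
    omega
  · have h1 : PySem.Int.bxor a b = -(((-a-1).toNat ^^^ b.toNat : Nat) : Int) - 1 := by
      unfold PySem.Int.bxor; rw [if_neg (show ¬ (0:Int) ≤ a by omega), if_pos hb]
    rw [h1]
    unfold PySem.Int.bxor
    rw [if_neg (show ¬ (0:Int) ≤ a by omega),
      if_neg (show ¬ (0:Int) ≤ -(((-a-1).toNat ^^^ b.toNat : Nat) : Int) - 1 by omega)]
    have h2 : (-(-(((-a-1).toNat ^^^ b.toNat : Nat) : Int) - 1) - 1)
        = (((-a-1).toNat ^^^ b.toNat : Nat) : Int) := by ring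
    rw [h2, Int.toNat_natCast, hxor, Int.toNat_of_nonneg hb]
  · have h1 : PySem.Int.bxor a b = (((-a-1).toNat ^^^ (-b-1).toNat : Nat) : Int) := by
      unfold PySem.Int.bxor
      rw [if_neg (show ¬ (0:Int) ≤ a by omega), if_neg (show ¬ (0:Int) ≤ b by omega)]
    rw [h1]
    unfold PySem.Int.bxor
    rw [if_neg (show ¬ (0:Int) ≤ a by omega), if_pos (Int.natCast_nonneg _),
      Int.toNat_natCast, hxor]
    omega

-- ---- phase 1 of A's inner loop (all y < x) ----
lemma inner_lt (D : List Int) (t : Int) (ht : 0 ≤ t) :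
    ∀ (ys : List Int), (∀ y ∈ ys, 0 ≤ y ∧ y < t) → ∀ (c a : Int) (f : List Int),
      t.toNat < f.length →
    ys.foldl (aInner D t) (c, f.set t.toNat a) =
      (c, f.set t.toNat (ys.foldl
        (fun acc y => if PySem.Int.bxor t y ∈ D then PySem.List.pyGetD f y 0 else acc) a)) := by
  intro ys
  induction ys with
  | nil => intro _ c a f hf; simp
  | cons y ys ih =>
    intro hmem c a f hf
    obtain ⟨hy0, hyt⟩ := hmem y (List.mem_cons_self ..)
    have hytn : y.toNat ≠ t.toNat := by omega
    have hylen : y.toNat < f.length := by omega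
    have hread : PySem.List.pyGetD (f.set t.toNat a) y 0 = PySem.List.pyGetD f y 0 := by
      rw [PySem.List.pyGetD_of_nonneg _ _ hy0, PySem.List.pyGetD_of_nonneg _ _ hy0,
        getD_set_ne _ _ _ _ (Ne.symm hytn)]
    simp only [List.foldl_cons]
    by_cases hC : PySem.Int.bxor t y ∈ D
    · have hstep : aInner D t (c, f.set t.toNat a) y
          = (c, f.set t.toNat (PySem.List.pyGetD f y 0)) := by
        unfold aInner
        rw [if_pos hC, if_neg (by rintro ⟨h1, -⟩; omega)]
        simp only
        rw [if_neg (by omega : ¬ t < y), hread,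
          PySem.List.pySetD_of_nonneg _ _ ht, PySem.List.pySetD_of_nonneg _ _ hy0,
          List.set_set]
        congr 1
        apply set_of_getD
        · simpa using hylen
        · rw [getD_set_ne _ _ _ _ (Ne.symm hytn), PySem.List.pyGetD_of_nonneg _ _ hy0]
      rw [hstep, if_pos hC]
      exact ih (fun z hz => hmem z (List.mem_cons_of_mem _ hz)) c _ f hf
    · have hstep : aInner D t (c, f.set t.toNat a) y = (c, f.set t.toNat a) := by
        unfold aInner; rw [if_neg hC]
      rw [hstep, if_neg hC]
      exact ih (fun z hz => hmem z (List.mem_cons_of_mem _ hz)) c a f hf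

-- ---- the y = x step of A's inner loop ----
lemma inner_eq (D : List Int) (t c : Int) (f : List Int) (ht : 0 ≤ t) (hf : t.toNat < f.length) :
    aInner D t (c, f) t =
      if (0:Int) ∈ D ∧ PySem.List.pyGetD f t 0 = -1 then (c + 1, f.set t.toNat c)
      else (c, f) := by
  unfold aInner
  rw [PySem.Int.bxor_self]
  by_cases h0 : (0:Int) ∈ D
  · rw [if_pos h0]
    by_cases hfv : PySem.List.pyGetD f t 0 = -1
    · rw [if_pos ⟨rfl, hfv⟩, if_pos ⟨h0, hfv⟩, PySem.List.pySetD_of_nonneg _ _ ht]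
    · have hng : ¬(t = t ∧ PySem.List.pyGetD f t 0 = -1) := fun h => hfv h.2
      have hng2 : ¬((0:Int) ∈ D ∧ PySem.List.pyGetD f t 0 = -1) := fun h => hfv h.2
      rw [if_neg hng, if_neg hng2]
      simp only
      rw [if_neg (lt_irrefl t), PySem.List.pySetD_of_nonneg _ _ ht,
        PySem.List.pySetD_of_nonneg _ _ ht, List.set_set]
      congr 1
      apply set_of_getD _ _ _ hf
      rw [PySem.List.pyGetD_of_nonneg _ _ ht]
  · rw [if_neg h0, if_neg (fun h => h0 h.1)]

-- ---- phase 3 of A's inner loop (all y > x) ----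
lemma inner_gt (D : List Int) (t : Int) (ht : 0 ≤ t) :
    ∀ (ys : List Int), (∀ y ∈ ys, t < y) → ∀ (c : Int) (f : List Int), t.toNat < f.length →
    ys.foldl (aInner D t) (c, f) =
      (c, ys.foldl (fun g y => if PySem.Int.bxor t y ∈ D then
            PySem.List.pySetD g y (PySem.List.pyGetD f t 0) else g) f) := by
  intro ys
  induction ys with
  | nil => intro _ c f hf; simp
  | cons y ys ih =>
    intro hmem c f hf
    have hty := hmem y (List.mem_cons_self ..)
    have hy0 : (0:Int) ≤ y := by omega
    have hytn : y.toNat ≠ t.toNat := by omega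
    simp only [List.foldl_cons]
    by_cases hC : PySem.Int.bxor t y ∈ D
    · have hstep : aInner D t (c, f) y
          = (c, PySem.List.pySetD f y (PySem.List.pyGetD f t 0)) := by
        unfold aInner
        rw [if_pos hC, if_neg (by rintro ⟨h1, -⟩; omega)]
        simp only
        rw [if_pos hty]
        congr 1
        rw [PySem.List.pySetD_of_nonneg (i := t) _ _ ht]
        congr 1
        apply set_of_getD _ _ _ hf
        rw [PySem.List.pyGetD_of_nonneg _ _ ht]
      rw [hstep, if_pos hC]
      have hf' : t.toNat < (PySem.List.pySetD f y (PySem.List.pyGetD f t 0)).length := by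
        rw [PySem.List.length_pySetD]; exact hf
      have hrd : PySem.List.pyGetD (PySem.List.pySetD f y (PySem.List.pyGetD f t 0)) t 0
          = PySem.List.pyGetD f t 0 := by
        rw [PySem.List.pySetD_of_nonneg _ _ hy0, PySem.List.pyGetD_of_nonneg _ _ ht,
          PySem.List.pyGetD_of_nonneg _ _ ht, getD_set_ne _ _ _ _ hytn]
      rw [ih (fun z hz => hmem z (List.mem_cons_of_mem _ hz)) c _ hf', hrd]
    · have hstep : aInner D t (c, f) y = (c, f) := by unfold aInner; rw [if_neg hC]
      rw [hstep, if_neg hC]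
      exact ih (fun z hz => hmem z (List.mem_cons_of_mem _ hz)) c f hf

lemma foldl_setIf_length (D : List Int) (t w : Int) :
    ∀ (ys : List Int) (f : List Int),
    (ys.foldl (fun g y => if PySem.Int.bxor t y ∈ D then PySem.List.pySetD g y w else g) f).length
      = f.length := by
  intro ys
  induction ys with
  | nil => intro f; rfl
  | cons y ys ih =>
    intro f
    simp only [List.foldl_cons]
    by_cases hC : PySem.Int.bxor t y ∈ D
    · rw [if_pos hC, ih, PySem.List.length_pySetD]
    · rw [if_neg hC, ih]

lemma foldl_setIf_getD (D : List Int) (t w : Int) :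
    ∀ (ys : List Int) (f : List Int), (∀ y ∈ ys, 0 ≤ y ∧ y < (f.length : Int)) → ∀ (i : Nat),
    (ys.foldl (fun g y => if PySem.Int.bxor t y ∈ D then PySem.List.pySetD g y w else g) f).getD i 0
      = if ((i : Int) ∈ ys ∧ PySem.Int.bxor t (i : Int) ∈ D) then w else f.getD i 0 := by
  intro ys
  induction ys with
  | nil => intro f _ i; simp
  | cons y ys ih =>
    intro f hmem i
    obtain ⟨hy0, hylen⟩ := hmem y (List.mem_cons_self ..)
    simp only [List.foldl_cons]
    by_cases hC : PySem.Int.bxor t y ∈ D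
    · rw [if_pos hC]
      have hlen' : ∀ z ∈ ys, 0 ≤ z ∧ z < ((PySem.List.pySetD f y w).length : Int) := by
        intro z hz
        rw [PySem.List.length_pySetD]
        exact hmem z (List.mem_cons_of_mem _ hz)
      rw [ih _ hlen' i]
      by_cases hin : ((i : Int) ∈ ys ∧ PySem.Int.bxor t (i : Int) ∈ D)
      · rw [if_pos hin, if_pos ⟨List.mem_cons_of_mem _ hin.1, hin.2⟩]
      · rw [if_neg hin]
        by_cases hiy : (i : Int) = y
        · have hCi : PySem.Int.bxor t (i : Int) ∈ D := by rw [hiy]; exact hC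
          rw [if_pos ⟨by rw [hiy]; exact List.mem_cons_self .., hCi⟩,
            PySem.List.pySetD_of_nonneg _ _ hy0]
          have hyi : y.toNat = i := by omega
          rw [hyi, getD_set_self _ _ _ (by omega)]
        · have hnot : ¬ ((i : Int) ∈ y :: ys ∧ PySem.Int.bxor t (i : Int) ∈ D) := by
            rintro ⟨h1, h2⟩
            rcases List.mem_cons.1 h1 with h | h
            · exact hiy h
            · exact hin ⟨h, h2⟩
          rw [if_neg hnot, PySem.List.pySetD_of_nonneg _ _ hy0,
            getD_set_ne _ _ _ _ (by omega)]
    · rw [if_neg hC, ih _ (fun z hz => hmem z (List.mem_cons_of_mem _ hz)) i]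
      by_cases hin : ((i : Int) ∈ ys ∧ PySem.Int.bxor t (i : Int) ∈ D)
      · rw [if_pos hin, if_pos ⟨List.mem_cons_of_mem _ hin.1, hin.2⟩]
      · have hnot : ¬ ((i : Int) ∈ y :: ys ∧ PySem.Int.bxor t (i : Int) ∈ D) := by
          rintro ⟨h1, h2⟩
          rcases List.mem_cons.1 h1 with h | h
          · rw [h] at h2; exact hC h2
          · exact hin ⟨h, h2⟩
        rw [if_neg hin, if_neg hnot]

-- ---- "last match wins" select fold: B's per-index value ----
def selF (D g : List Int) (z : Int) (acc : Int) (y : Nat) : Int :=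
  if PySem.Int.bxor z (y : Int) ∈ D then g.getD y 0 else acc

def pre (D g : List Int) (z : Int) : Int := (List.range g.length).foldl (selF D g z) (-1)

lemma selF_idem (D g : List Int) (z : Int) :
    ∀ (t : Nat) (a : Int),
    (List.range t).foldl (selF D g z) ((List.range t).foldl (selF D g z) a) =
      (List.range t).foldl (selF D g z) a := by
  intro t
  induction t with
  | zero => intro a; rfl
  | succ t ih =>
    intro a
    rw [List.range_succ, List.foldl_append, List.foldl_append]
    simp only [List.foldl_cons, List.foldl_nil]
    by_cases hC : PySem.Int.bxor z (t:Int) ∈ D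
    · have h : ∀ x : Int, selF D g z x t = g.getD t 0 := fun x => by
        unfold selF; rw [if_pos hC]
      simp only [h]
    · have h : ∀ x : Int, selF D g z x t = x := fun x => by
        unfold selF; rw [if_neg hC]
      simp only [h]
      exact ih a

def preIdx (D : List Int) (t : Nat) (z : Int) : Int :=
  (List.range t).foldl
    (fun acc (y : Nat) => if PySem.Int.bxor z ((y:Nat):Int) ∈ D then ((y:Nat):Int) else acc) (-1)

lemma preIdx_succ (D : List Int) (t : Nat) (z : Int) :
    preIdx D (t+1) z = if PySem.Int.bxor z (t:Int) ∈ D then (t:Int) else preIdx D t z := by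
  unfold preIdx
  rw [List.range_succ, List.foldl_append]
  simp only [List.foldl_cons, List.foldl_nil]

lemma preIdx_cases (D : List Int) (z : Int) : ∀ (t : Nat),
    preIdx D t z = -1 ∨
      (0 ≤ preIdx D t z ∧ preIdx D t z < (t:Int) ∧ PySem.Int.bxor z (preIdx D t z) ∈ D) := by
  intro t
  induction t with
  | zero => left; rfl
  | succ t ih =>
    rw [preIdx_succ]
    by_cases hC : PySem.Int.bxor z (t:Int) ∈ D
    · rw [if_pos hC]; right; exact ⟨Int.natCast_nonneg _, by omega, hC⟩
    · rw [if_neg hC]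
      rcases ih with h | ⟨h1, h2, h3⟩
      · left; exact h
      · right; exact ⟨h1, by omega, h3⟩

lemma preIdx_ge (D : List Int) (z : Int) : ∀ (t : Nat) (y : Nat), y < t →
    PySem.Int.bxor z (y:Int) ∈ D → (y:Int) ≤ preIdx D t z := by
  intro t
  induction t with
  | zero => intro y hy _; omega
  | succ t ih =>
    intro y hy hC
    rw [preIdx_succ]
    by_cases hCt : PySem.Int.bxor z (t:Int) ∈ D
    · rw [if_pos hCt]; exact_mod_cast Nat.le_of_lt_succ hy
    · rw [if_neg hCt]
      have hyt : y ≠ t := by rintro rfl; exact hCt hC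
      exact ih y (by omega) hC

lemma pre_eq_read (D g : List Int) (z : Int) :
    pre D g z = if 0 ≤ preIdx D g.length z then g.getD (preIdx D g.length z).toNat 0 else -1 := by
  suffices h : ∀ t : Nat,
      (List.range t).foldl (selF D g z) (-1) =
        if 0 ≤ preIdx D t z then g.getD (preIdx D t z).toNat 0 else -1 from h g.length
  intro t
  induction t with
  | zero =>
    have : preIdx D 0 z = -1 := rfl
    rw [this]
    norm_num
  | succ t ih =>
    rw [List.range_succ, List.foldl_append]
    simp only [List.foldl_cons, List.foldl_nil]
    rw [preIdx_succ]
    by_cases hC : PySem.Int.bxor z (t:Int) ∈ D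
    · have h : ∀ x : Int, selF D g z x t = g.getD t 0 := fun x => by
        unfold selF; rw [if_pos hC]
      rw [h, if_pos hC, if_pos (Int.natCast_nonneg _), Int.toNat_natCast]
    · have h : ∀ x : Int, selF D g z x t = x := fun x => by
        unfold selF; rw [if_neg hC]
      rw [h, if_neg hC, ih]

lemma pre_append (D g : List Int) (v z : Int) :
    pre D (g ++ [v]) z = if PySem.Int.bxor z (g.length : Int) ∈ D then v else pre D g z := by
  unfold pre
  have hl : (g ++ [v]).length = g.length + 1 := by simp
  rw [hl, List.range_succ, List.foldl_append]
  simp only [List.foldl_cons, List.foldl_nil]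
  have h1 : (List.range g.length).foldl (selF D (g ++ [v]) z) (-1)
      = (List.range g.length).foldl (selF D g z) (-1) := by
    apply foldl_congr'
    intro acc y hy
    have hy' : y < g.length := List.mem_range.1 hy
    unfold selF
    rw [getD_append_left _ _ _ hy']
  rw [h1]
  by_cases hC : PySem.Int.bxor z (g.length : Int) ∈ D
  · have h : ∀ x : Int, selF D (g ++ [v]) z x g.length = v := fun x => by
      unfold selF
      rw [if_pos hC, getD_append_right _ _ _ le_rfl]
      simp
    rw [h, if_pos hC]
  · have h : ∀ x : Int, selF D (g ++ [v]) z x g.length = x := fun x => by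
      unfold selF; rw [if_neg hC]
    rw [h, if_neg hC]

-- ---- characterisation of B's bBest as the preIdx of A's scan order ----
def Sp (D : List Int) (x y : Int) : Prop := 0 ≤ y ∧ y < x ∧ PySem.Int.bxor x y ∈ D

lemma bBest_mono (x : Int) : ∀ (l : List Int) (acc : Int),
    acc ≤ l.foldl (fun best d =>
      let y := PySem.Int.bxor x d
      if 0 ≤ y ∧ y < x ∧ best < y then y else best) acc := by
  intro l
  induction l with
  | nil => intro acc; exact le_rfl
  | cons d l ih =>
    intro acc
    simp only [List.foldl_cons]
    refine le_trans ?_ (ih _)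
    by_cases h : 0 ≤ PySem.Int.bxor x d ∧ PySem.Int.bxor x d < x ∧ acc < PySem.Int.bxor x d
    · simp only [if_pos h]; exact le_of_lt h.2.2
    · simp only [if_neg h]; exact le_rfl

lemma bBest_cases (D : List Int) (x : Int) : bBest D x = -1 ∨ Sp D x (bBest D x) := by
  suffices h : ∀ (l : List Int), (∀ d ∈ l, d ∈ D) → ∀ acc, (acc = -1 ∨ Sp D x acc) →
      (l.foldl (fun best d =>
        let y := PySem.Int.bxor x d
        if 0 ≤ y ∧ y < x ∧ best < y then y else best) acc = -1 ∨
       Sp D x (l.foldl (fun best d =>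
        let y := PySem.Int.bxor x d
        if 0 ≤ y ∧ y < x ∧ best < y then y else best) acc)) from
    h D (fun _ h => h) (-1) (Or.inl rfl)
  intro l
  induction l with
  | nil => intro _ acc hacc; exact hacc
  | cons d l ih =>
    intro hsub acc hacc
    simp only [List.foldl_cons]
    apply ih (fun z hz => hsub z (List.mem_cons_of_mem _ hz))
    by_cases h : 0 ≤ PySem.Int.bxor x d ∧ PySem.Int.bxor x d < x ∧ acc < PySem.Int.bxor x d
    · simp only [if_pos h]
      right
      refine ⟨h.1, h.2.1, ?_⟩
      rw [bxor_cancel]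
      exact hsub d (List.mem_cons_self ..)
    · simp only [if_neg h]; exact hacc

lemma bBest_ge (D : List Int) (x : Int) : ∀ y, Sp D x y → y ≤ bBest D x := by
  intro y hy
  have hd : PySem.Int.bxor x y ∈ D := hy.2.2
  suffices h : ∀ (l : List Int), PySem.Int.bxor x y ∈ l → ∀ acc,
      y ≤ l.foldl (fun best d =>
        let y := PySem.Int.bxor x d
        if 0 ≤ y ∧ y < x ∧ best < y then y else best) acc from h D hd (-1)
  intro l
  induction l with
  | nil => intro h; exact absurd h (List.not_mem_nil)
  | cons d l ih =>
    intro hmem acc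
    simp only [List.foldl_cons]
    rcases List.mem_cons.1 hmem with h | h
    · have hyd : PySem.Int.bxor x d = y := by rw [← h, bxor_cancel]
      refine le_trans ?_ (bBest_mono x l _)
      rw [hyd]
      by_cases hcond : 0 ≤ y ∧ y < x ∧ acc < y
      · rw [if_pos hcond]
      · rw [if_neg hcond]
        have := hy.1
        have := hy.2.1
        omega
    · exact ih h _

lemma bBest_eq_preIdx (D : List Int) (t : Nat) : bBest D (t:Int) = preIdx D t (t:Int) := by
  rcases bBest_cases D (t:Int) with h1 | h1 <;> rcases preIdx_cases D (t:Int) t with h2 | h2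
  · rw [h1, h2]
  · exfalso
    have hsp : Sp D (t:Int) (preIdx D t (t:Int)) := ⟨h2.1, h2.2.1, h2.2.2⟩
    have := bBest_ge D (t:Int) _ hsp
    rw [h1] at this
    omega
  · exfalso
    obtain ⟨hb0, hbt, hbD⟩ := h1
    have hcast : ((bBest D (t:Int)).toNat : Int) = bBest D (t:Int) := Int.toNat_of_nonneg hb0
    have := preIdx_ge D (t:Int) t (bBest D (t:Int)).toNat (by omega) (by rw [hcast]; exact hbD)
    rw [hcast, h2] at this
    omega
  · obtain ⟨hb0, hbt, hbD⟩ := h1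
    obtain ⟨hp0, hpt, hpD⟩ := h2
    have hle1 : preIdx D t (t:Int) ≤ bBest D (t:Int) :=
      bBest_ge D (t:Int) _ ⟨hp0, hpt, hpD⟩
    have hcast : ((bBest D (t:Int)).toNat : Int) = bBest D (t:Int) := Int.toNat_of_nonneg hb0
    have hle2 := preIdx_ge D (t:Int) t (bBest D (t:Int)).toNat (by omega) (by rw [hcast]; exact hbD)
    rw [hcast] at hle2
    omega

-- ---- B's fold, unfolded one step ----
def BSfold (D : List Int) (t : Nat) : List Int × Int :=
  (List.range t).foldl (fun st (j : Nat) => bStep D st (j:Int)) ([], 0)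

def preList (D g : List Int) (N : Nat) : List Int :=
  (List.range (N - g.length)).map (fun j => pre D g ((g.length + j : Nat) : Int))

lemma bStep_fst_len (D : List Int) (st : List Int × Int) (x : Int) :
    (bStep D st x).1.length = st.1.length + 1 := by
  simp only [bStep]
  split_ifs <;> simp

lemma BSfold_succ (D : List Int) (t : Nat) : BSfold D (t+1) = bStep D (BSfold D t) (t:Int) := by
  unfold BSfold; rw [List.range_succ, List.foldl_append]; rfl

lemma BSfold_len (D : List Int) : ∀ t, (BSfold D t).1.length = t := by
  intro t
  induction t with
  | zero => rfl
  | succ t ih => rw [BSfold_succ, bStep_fst_len, ih]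

lemma bStep_eq (D : List Int) (g : List Int) (c : Int) (t : Nat) (hg : g.length = t) :
    bStep D (g, c) (t:Int) =
      if (0:Int) ∈ D ∧ pre D g (t:Int) = -1 then (g ++ [c], c + 1)
      else (g ++ [pre D g (t:Int)], c) := by
  have hv : (if 0 ≤ bBest D (t:Int) then PySem.List.pyGetD g (bBest D (t:Int)) 0 else -1)
      = pre D g (t:Int) := by
    rw [bBest_eq_preIdx, pre_eq_read, hg]
    by_cases h : 0 ≤ preIdx D t (t:Int)
    · rw [if_pos h, if_pos h, PySem.List.pyGetD_of_nonneg _ _ h]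
    · rw [if_neg h, if_neg h]
  simp only [bStep]
  rw [hv]

-- ---- the main invariant ----
lemma main_inv (D : List Int) (N : Nat) :
    ∀ t, t ≤ N →
    (List.range t).foldl (fun st (j : Nat) => aStep D (N:Int) st (j:Int))
        (0, List.replicate N (-1)) =
      ((BSfold D t).2, (BSfold D t).1 ++ preList D (BSfold D t).1 N) := by
  intro t
  induction t with
  | zero =>
    intro _
    simp only [List.range_zero, List.foldl_nil]
    have h1 : BSfold D 0 = ([], 0) := rfl
    rw [h1]
    have hp : preList D [] N = List.replicate N (-1) := by
      unfold preList pre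
      simp only [List.length_nil, List.range_zero, List.foldl_nil, Nat.sub_zero]
      rw [List.map_const']
      simp
    rw [hp]
    simp
  | succ t ih =>
    intro h
    have htN : t < N := h
    have htn : ((t:Int)).toNat = t := Int.toNat_natCast t
    rw [List.range_succ, List.foldl_append, ih (le_of_lt htN)]
    simp only [List.foldl_cons, List.foldl_nil]
    have hgl : (BSfold D t).1.length = t := BSfold_len D t
    set g := (BSfold D t).1 with hgdef
    set c := (BSfold D t).2 with hcdef
    set F := g ++ preList D g N with hFdef
    have hpllen : (preList D g N).length = N - t := by
      unfold preList; rw [hgl]; simp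
    have hFlen : F.length = N := by
      rw [hFdef, List.length_append, hgl, hpllen]; omega
    have hp : F.getD t 0 = pre D g (t:Int) := by
      rw [hFdef, getD_append_right _ _ _ (by omega), hgl, Nat.sub_self]
      unfold preList
      rw [getD_eq_get _ _ (by simp [hgl]; omega)]
      simp [hgl]
    -- split the inner range
    have hsplit : PySem.List.pyRange 0 (N:Int) 1 =
        (PySem.List.pyRange 0 (t:Int) 1 ++ [(t:Int)]) ++ PySem.List.pyRange ((t:Int)+1) (N:Int) 1 := by
      rw [← PySem.List.pyRange_one_singleton (t:Int)]
      rw [← PySem.List.pyRange_one_append 0 (t:Int) ((t:Int)+1) (by omega) (by omega)]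
      rw [← PySem.List.pyRange_one_append 0 ((t:Int)+1) (N:Int) (by omega) (by omega)]
    show aStep D (N:Int) (c, F) (t:Int) = _
    unfold aStep
    rw [hsplit, List.foldl_append, List.foldl_append]
    -- phase 1: identity
    have hstate : (c, F) = (c, F.set ((t:Int)).toNat (F.getD t 0)) := by
      rw [htn, set_of_getD F t _ (by omega) rfl]
    rw [hstate, inner_lt D (t:Int) (by omega) _
      (fun y hy => by rw [PySem.List.mem_pyRange_one] at hy; omega) c _ F (by omega)]
    have hfold : (PySem.List.pyRange 0 (t:Int) 1).foldl
        (fun acc y => if PySem.Int.bxor (t:Int) y ∈ D then PySem.List.pyGetD F y 0 else acc)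
        (F.getD t 0) = F.getD t 0 := by
      rw [PySem.List.pyRange_one, List.foldl_map]
      have hsub : (((t:Int)) - 0).toNat = t := by omega
      rw [hsub]
      rw [foldl_congr' _ _ (selF D g (t:Int)) _ (by
        intro acc k hk
        have hk' : k < t := List.mem_range.1 hk
        unfold selF
        simp only [zero_add]
        rw [PySem.List.pyGetD_of_nonneg _ _ (Int.natCast_nonneg k), Int.toNat_natCast,
          hFdef, getD_append_left _ _ _ (by omega)])]
      rw [hp]
      have hpre : pre D g (t:Int) = (List.range t).foldl (selF D g (t:Int)) (-1) := by
        unfold pre; rw [hgl]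
      rw [hpre, selF_idem]
    rw [hfold, htn, set_of_getD F t _ (by omega) rfl]
    -- phase 2
    simp only [List.foldl_cons, List.foldl_nil]
    rw [inner_eq D (t:Int) c F (by omega) (by omega)]
    have hpint : PySem.List.pyGetD F (t:Int) 0 = pre D g (t:Int) := by
      rw [PySem.List.pyGetD_of_nonneg _ _ (by omega : (0:Int) ≤ (t:Int)), htn, hp]
    rw [hpint]
    -- phase 3 + reassembly, uniform in the written value
    have key : ∀ (v c'' : Int),
        (PySem.List.pyRange ((t:Int)+1) (N:Int) 1).foldl (aInner D (t:Int)) (c'', F.set t v) =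
          (c'', (g ++ [v]) ++ preList D (g ++ [v]) N) := by
      intro v c''
      rw [inner_gt D (t:Int) (by omega) _
        (fun y hy => by rw [PySem.List.mem_pyRange_one] at hy; omega) c'' (F.set t v)
        (by rw [htn]; simp only [List.length_set]; omega)]
      congr 1
      have hw : PySem.List.pyGetD (F.set t v) (t:Int) 0 = v := by
        rw [PySem.List.pyGetD_of_nonneg _ _ (by omega : (0:Int) ≤ (t:Int)), htn,
          getD_set_self _ _ _ (by omega)]
      apply ext_getD
      · rw [foldl_setIf_length]
        simp only [List.length_set, hFlen]
        rw [List.length_append, List.length_append, hgl]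
        unfold preList
        simp only [List.length_map, List.length_range, List.length_append, hgl,
          List.length_cons, List.length_nil]
        omega
      · intro i hi
        rw [foldl_setIf_length] at hi
        simp only [List.length_set, hFlen] at hi
        rw [foldl_setIf_getD D (t:Int) _ _ _ (by
            intro y hy
            rw [PySem.List.mem_pyRange_one] at hy
            simp only [List.length_set, hFlen]
            omega) i, hw]
        have hmem_iff : ((i:Int) ∈ PySem.List.pyRange ((t:Int)+1) (N:Int) 1) ↔ (t < i ∧ i < N) := by
          rw [PySem.List.mem_pyRange_one]; omega
        rcases Nat.lt_trichotomy i t with hit | hit | hit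
        · -- i < t
          rw [if_neg (by rw [hmem_iff]; omega)]
          rw [getD_set_ne _ _ _ _ (by omega), hFdef, getD_append_left _ _ _ (by omega),
            getD_append_left _ _ _ (by rw [List.length_append, hgl]; simp; omega),
            getD_append_left _ _ _ (by omega)]
        · -- i = t
          subst hit
          rw [if_neg (by rw [hmem_iff]; omega)]
          rw [getD_set_self _ _ _ (by omega),
            getD_append_left _ _ _ (by rw [List.length_append, hgl]; simp),
            getD_append_right _ _ _ (by omega), hgl, Nat.sub_self]
          simp
        · -- t < i
          have hFi : (F.set t v).getD i 0 = pre D g (i:Int) := by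
            rw [getD_set_ne _ _ _ _ (by omega), hFdef, getD_append_right _ _ _ (by omega), hgl]
            unfold preList
            rw [getD_eq_get _ _ (by simp [hgl]; omega)]
            simp only [List.getElem_map, List.getElem_range, hgl]
            congr 1
            omega
          have hRHS : ((g ++ [v]) ++ preList D (g ++ [v]) N).getD i 0
              = if PySem.Int.bxor (t:Int) (i:Int) ∈ D then v else pre D g (i:Int) := by
            rw [getD_append_right _ _ _ (by rw [List.length_append, hgl]; simp; omega)]
            unfold preList
            rw [getD_eq_get _ _ (by
              simp only [List.length_map, List.length_range, List.length_append, hgl,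
                List.length_cons, List.length_nil]
              omega)]
            simp only [List.getElem_map, List.getElem_range, List.length_append, hgl,
              List.length_cons, List.length_nil]
            have harg : t + 1 + (i - (t + 1 + 0)) = i := by omega
            rw [harg, pre_append]
            rw [hgl, PySem.Int.bxor_comm]
          rw [hRHS]
          by_cases hC : PySem.Int.bxor (t:Int) (i:Int) ∈ D
          · rw [if_pos ⟨hmem_iff.2 ⟨hit, hi⟩, hC⟩, if_pos hC]
          · rw [if_neg (by tauto), if_neg hC]
            exact hFi
    -- assemble
    have hBS : BSfold D t = (g, c) := rfl
    by_cases hfresh : (0:Int) ∈ D ∧ pre D g (t:Int) = -1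
    · rw [if_pos hfresh, htn, key c (c + 1), BSfold_succ, hBS,
        bStep_eq D g c t hgl, if_pos hfresh]
    · rw [if_neg hfresh]
      have hre : F = F.set t (pre D g (t:Int)) := (set_of_getD F t _ (by omega) hp).symm
      conv_lhs => rw [hre]
      rw [key (pre D g (t:Int)) c, BSfold_succ, hBS, bStep_eq D g c t hgl, if_neg hfresh]

-- ===== VERDICT (by name: the statement is the Claim_ definition above) =====
theorem gen_oracle_spec : Claim_equal_gen_oracle := by
  intro k D _ _
  unfold Spec_gen_oracle
  simp only [gen_oracle, gen_oracle_alt]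
  set N : Nat := 2 ^ k.toNat with hNdef
  have hN : ((2:Int) ^ k.toNat) = ((N : Nat) : Int) := by rw [hNdef]; push_cast; ring
  rw [hN]
  have hrange : PySem.List.pyRange 0 ((N:Nat):Int) 1
      = (List.range N).map (fun (j : Nat) => ((j:Nat):Int)) := by
    rw [PySem.List.pyRange_one]
    simp
  rw [hrange]
  have hinit : ((List.range N).map (fun (j : Nat) => ((j:Nat):Int))).map (fun _ => (-1:Int))
      = List.replicate N (-1) := by
    rw [List.map_map]
    have hcomp : ((fun (_ : Int) => (-1:Int)) ∘ (fun (j : Nat) => ((j:Nat):Int)))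
        = (fun (_ : Nat) => (-1:Int)) := rfl
    rw [hcomp, List.map_const']
    simp
  rw [hinit]
  have hAmap : ((List.range N).map (fun (j : Nat) => ((j:Nat):Int))).foldl
      (aStep D ((N:Nat):Int)) (0, List.replicate N (-1))
      = ((BSfold D N).2, (BSfold D N).1 ++ preList D (BSfold D N).1 N) := by
    rw [List.foldl_map]
    exact main_inv D N N le_rfl
  have hBmap : ((List.range N).map (fun (j : Nat) => ((j:Nat):Int))).foldl
      (bStep D) ([], 0) = BSfold D N := by
    rw [List.foldl_map]
    rfl
  rw [hAmap, hBmap]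
  have hpl : preList D (BSfold D N).1 N = [] := by
    unfold preList
    rw [BSfold_len]
    simp
  rw [hpl, List.append_nil]
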